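-- pv_equiv track=rewrite | github.com/aulojor/prog-team-proj | parser.py | boundaries
-- ===== SOURCE A (Python) =====
-- def is_blank(l: str) -> bool:
--     return len(l.strip(" ")) == 0
--
-- def boundaries(data: list[str]):
--     boundaries = []
--     start = None
--     for (idx,l) in enumerate(data):
--         if start is None:
--             if not is_blank(l):
--                 start = idx
--         else:
--             if is_blank(l):
--                 boundaries.append((start,idx))
--                 start = None
--     return boundaries
-- ===== SOURCE B (Python) =====
-- def is_blank(l: str) -> bool:
--     return len(l.strip(" ")) == 0
--
-- def boundaries(data: list[str]):
--     # Run-length decomposition: split data into maximal runs of equal blankness,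
--     # then keep every non-blank run except the last run overall (a trailing
--     # non-blank run has no closing blank line, so it is never reported).
--     runs = []  # (blank, start, end) for each maximal run
--     pos = 0
--     rest = data
--     while rest:
--         b = is_blank(rest[0])
--         n = 1
--         while n < len(rest) and is_blank(rest[n]) == b:
--             n += 1
--         runs.append((b, pos, pos + n))
--         pos += n
--         rest = rest[n:]
--     return [(s, e) for (b, s, e) in runs[:-1] if not b]
-- ===== Notes on version B (the rewrite author's own statement) =====
-- stated objective: alternative
-- what changed: Replaces A's single-pass blank/non-blank state machine with a run-length decomposition: B first splits the input into maximal runs of equal blankness with their start/end positions, then keeps every non-blank run except the last run overall (which has no closing blank line).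
import Mathlib
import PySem

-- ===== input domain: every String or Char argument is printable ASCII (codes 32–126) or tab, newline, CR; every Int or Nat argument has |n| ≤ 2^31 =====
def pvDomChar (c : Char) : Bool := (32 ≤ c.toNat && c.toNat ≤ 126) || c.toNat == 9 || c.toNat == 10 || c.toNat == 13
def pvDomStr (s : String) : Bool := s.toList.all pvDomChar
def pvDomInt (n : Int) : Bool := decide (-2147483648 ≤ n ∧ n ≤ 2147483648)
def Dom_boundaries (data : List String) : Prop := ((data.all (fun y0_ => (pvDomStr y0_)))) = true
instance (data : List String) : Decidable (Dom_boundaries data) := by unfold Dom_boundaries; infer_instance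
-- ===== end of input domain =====

-- B rewrites A's one-pass state machine as a run-length decomposition (maximal blank/non-blank
-- runs, then keep non-blank runs except the last run); objective: alternative decomposition.

-- ===== PORT A =====
def is_blank (l : String) : Bool := (PySem.Str.stripChars l " ").length == 0

def boundaries (data : List String) : List (Int × Int) :=
  (((PySem.List.enumerate data).foldl
      (fun (st : List (Int × Int) × Option Int) (p : Int × String) =>
        match st.2 with
        | none => if !is_blank p.2 then (st.1, some p.1) else st
        | some s => if is_blank p.2 then (st.1 ++ [(s, p.1)], none) else st)
      ([], none))).1

-- ===== PORT B =====
-- inner while of Source B: how many further lines share blankness b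
def runLen (b : Bool) : List String → Nat
  | [] => 0
  | l :: rest => if is_blank l = b then runLen b rest + 1 else 0

-- outer while of Source B: the list of maximal runs (blank, start, end)
def runsFrom (pos : Int) : List String → List (Bool × Int × Int)
  | [] => []
  | l :: rest =>
      let b := is_blank l
      let k := runLen b rest
      (b, pos, pos + (k : Int) + 1) :: runsFrom (pos + (k : Int) + 1) (rest.drop k)
  termination_by xs => xs.length
  decreasing_by
    simp only [List.length_drop, List.length_cons]
    omega

def boundaries_alt (data : List String) : List (Int × Int) :=
  ((runsFrom 0 data).dropLast.filter (fun r => !r.1)).map (fun r => r.2)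

-- ===== PRECONDITION & SPEC =====
def Spec_boundaries (data : List String) (out : List (Int × Int)) : Prop := out = boundaries_alt data
instance (data : List String) (out : List (Int × Int)) : Decidable (Spec_boundaries data out) := by unfold Spec_boundaries; infer_instance

-- ===== CLAIM (what is proved, stated in full; the proofs are below) =====
def Claim_equal_boundaries : Prop := ∀ (data : List String), Dom_boundaries data → Spec_boundaries data (boundaries data)

-- ===== LEMMAS AND PROOFS =====

-- A's loop as an explicit recursion (state: open-block start, current index)
def aLoop : Option Int → Int → List String → List (Int × Int)
  | _, _, [] => []
  | none, idx, l :: rest =>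
      if !is_blank l then aLoop (some idx) (idx + 1) rest else aLoop none (idx + 1) rest
  | some s, idx, l :: rest =>
      if is_blank l then (s, idx) :: aLoop none (idx + 1) rest else aLoop (some s) (idx + 1) rest

theorem aLoop_foldl (xs : List String) : ∀ (acc : List (Int × Int)) (st : Option Int) (idx : Int),
    ((PySem.List.enumerate xs idx).foldl
      (fun (st : List (Int × Int) × Option Int) (p : Int × String) =>
        match st.2 with
        | none => if !is_blank p.2 then (st.1, some p.1) else st
        | some s => if is_blank p.2 then (st.1 ++ [(s, p.1)], none) else st)
      (acc, st)).1 = acc ++ aLoop st idx xs := by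
  induction xs with
  | nil => intro acc st idx; simp [PySem.List.enumerate_nil, aLoop]
  | cons l rest ih =>
      intro acc st idx
      rw [PySem.List.enumerate_cons]
      cases st with
      | none =>
          by_cases h : is_blank l
          · simp only [List.foldl_cons, aLoop, h]
            simpa using ih acc none (idx + 1)
          · simp only [List.foldl_cons, aLoop, h]
            simpa using ih acc (some idx) (idx + 1)
      | some s =>
          by_cases h : is_blank l
          · simp only [List.foldl_cons, aLoop, h]
            simpa using ih (acc ++ [(s, idx)]) none (idx + 1)
          · simp only [List.foldl_cons, aLoop, h]
            simpa using ih acc (some s) (idx + 1)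

-- B's result, written as the natural recursion over runs
def bFrom (pos : Int) : List String → List (Int × Int)
  | [] => []
  | l :: rest =>
      let b := is_blank l
      let k := runLen b rest
      if rest.drop k = [] then []
      else (if b then [] else [(pos, pos + (k : Int) + 1)]) ++ bFrom (pos + (k : Int) + 1) (rest.drop k)
  termination_by xs => xs.length
  decreasing_by
    simp only [List.length_drop, List.length_cons]
    omega

theorem runsFrom_eq_nil_iff (pos : Int) (xs : List String) : runsFrom pos xs = [] ↔ xs = [] := by
  cases xs <;> simp [runsFrom]

theorem boundaries_alt_eq_bFrom : ∀ (n : Nat) (xs : List String), xs.length ≤ n → ∀ (pos : Int),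
    ((runsFrom pos xs).dropLast.filter (fun r => !r.1)).map (fun r => r.2) = bFrom pos xs := by
  intro n
  induction n with
  | zero =>
      intro xs h pos
      have hx : xs = [] := by cases xs <;> simp_all
      subst hx; simp [runsFrom, bFrom]
  | succ m ih =>
      intro xs h pos
      cases xs with
      | nil => simp [runsFrom, bFrom]
      | cons l rest =>
          rw [runsFrom, bFrom]
          by_cases hh : rest.drop (runLen (is_blank l) rest) = []
          · rw [hh]
            simp [runsFrom]
          · have hne : runsFrom (pos + (runLen (is_blank l) rest : Int) + 1)
                (rest.drop (runLen (is_blank l) rest)) ≠ [] := by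
              rw [ne_eq, runsFrom_eq_nil_iff]; exact hh
            rw [List.dropLast_cons_of_ne_nil hne]
            have hlen : (rest.drop (runLen (is_blank l) rest)).length ≤ m := by
              simp only [List.length_drop]
              simp only [List.length_cons] at h
              omega
            by_cases hb : is_blank l
            · have hh' : ¬ rest.length ≤ runLen true rest := by
                rw [List.drop_eq_nil_iff, hb] at hh; exact hh
            
              simp [hb, hh']
              exact ih _ (by rwa [hb] at hlen) _
            · have hb' : is_blank l = false := by simpa using hb
              have hh' : ¬ rest.length ≤ runLen false rest := by
                rw [List.drop_eq_nil_iff, hb'] at hh; exact hh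
              simp [hb', hh']
              exact ih _ (by rwa [hb'] at hlen) _

-- one blank line at the head may be absorbed into bFrom of the tail
theorem bFrom_blank_cons (pos : Int) (l : String) (rest : List String) (hb : is_blank l = true) :
    bFrom pos (l :: rest) = bFrom (pos + 1) rest := by
  cases rest with
  | nil => simp [bFrom, runLen]
  | cons l2 rest2 =>
      by_cases h2 : is_blank l2
      · rw [bFrom, bFrom]
        have hr : runLen true (l2 :: rest2) = runLen true rest2 + 1 := by simp [runLen, h2]
        simp only [hb, h2, hr, List.drop_succ_cons]
        have e1 : pos + ((runLen true rest2 + 1 : Nat) : Int) + 1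
            = pos + 1 + (runLen true rest2 : Int) + 1 := by push_cast; ring
        rw [e1]
        by_cases hd : rest2.drop (runLen true rest2) = [] <;> simp [hd]
      · have hr : runLen true (l2 :: rest2) = 0 := by simp [runLen, h2]
        conv_lhs => rw [bFrom]
        simp only [hb, hr, Nat.cast_zero, List.drop_zero, if_true, List.nil_append]
        rw [if_neg (by simp)]
        norm_num

-- the line after a maximal b-run has blankness ≠ b
theorem runLen_stops (b : Bool) (rest : List String) :
    ∀ l2 ∈ (rest.drop (runLen b rest)).head?, is_blank l2 = !b := by
  induction rest with
  | nil => simp [runLen]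
  | cons l r ih =>
      by_cases h : is_blank l = b
      · simp only [runLen, h, if_pos rfl]
        exact ih
      · simp only [runLen, if_neg h, List.drop_zero, List.head?_cons]
        intro l2 hl2
        simp only [Option.mem_def, Option.some.injEq] at hl2
        subst hl2
        cases b <;> simp_all

-- the open-block phase of A: scan until the first blank line
theorem aLoop_some (rest : List String) : ∀ (s idx : Int),
    aLoop (some s) idx rest =
      (if rest.drop (runLen false rest) = [] then []
       else (s, idx + (runLen false rest : Int)) ::
         aLoop none (idx + (runLen false rest : Int) + 1) (rest.drop (runLen false rest)).tail) := by
  induction rest with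
  | nil => intro s idx; simp [aLoop, runLen]
  | cons l r ih =>
      intro s idx
      by_cases h : is_blank l
      · have hr : runLen false (l :: r) = 0 := by simp [runLen, h]
        rw [aLoop, if_pos h, hr]
        simp
      · have hr : runLen false (l :: r) = runLen false r + 1 := by simp [runLen, h]
        rw [aLoop, if_neg h, hr, List.drop_succ_cons]
        rw [ih s (idx + 1)]
        by_cases hd : r.drop (runLen false r) = []
        · simp [hd]
        · rw [if_neg hd, if_neg hd]
          have e1 : idx + 1 + (runLen false r : Int)
              = idx + ((runLen false r + 1 : Nat) : Int) := by push_cast; ring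
          have e2 : idx + 1 + (runLen false r : Int) + 1
              = idx + ((runLen false r + 1 : Nat) : Int) + 1 := by push_cast; ring
          rw [e1]

-- main equivalence of the two loops
theorem aLoop_none_eq_bFrom : ∀ (n : Nat) (xs : List String), xs.length ≤ n → ∀ (idx : Int),
    aLoop none idx xs = bFrom idx xs := by
  intro n
  induction n with
  | zero =>
      intro xs h idx
      have hx : xs = [] := by cases xs <;> simp_all
      subst hx; simp [aLoop, bFrom]
  | succ m ih =>
      intro xs h idx
      cases xs with
      | nil => simp [aLoop, bFrom]
      | cons l rest =>
          simp only [List.length_cons] at h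
          by_cases hb : is_blank l
          · rw [aLoop]
            simp only [hb, Bool.not_true, Bool.false_eq_true, if_false]
            rw [ih rest (by omega) (idx + 1)]
            exact (bFrom_blank_cons idx l rest hb).symm
          · have hb' : is_blank l = false := by simpa using hb
            rw [aLoop]
            simp only [hb', Bool.not_false, if_true]
            rw [aLoop_some rest idx (idx + 1)]
            rw [bFrom]
            simp only [hb', Bool.false_eq_true, if_false]
            set k := runLen false rest with hk
            by_cases hd : rest.drop k = []
            · simp [hd]
            · rw [if_neg hd, if_neg hd]
              obtain ⟨l2, t2, he⟩ : ∃ l2 t2, rest.drop k = l2 :: t2 := by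
                cases hcc : rest.drop k with
                | nil => exact absurd hcc hd
                | cons a b => exact ⟨a, b, rfl⟩
              have hl2 : is_blank l2 = true := by
                have := runLen_stops false rest
                rw [← hk, he] at this
                simpa using this l2
              rw [he, List.tail_cons]
              have ht2 : t2.length ≤ m := by
                have h1 : (rest.drop k).length = rest.length - k := by simp
                rw [he] at h1
                simp only [List.length_cons] at h1
                omega
              rw [ih t2 ht2 (idx + 1 + (k : Int) + 1)]
              rw [bFrom_blank_cons (idx + (k : Int) + 1) l2 t2 hl2]
              have e1 : idx + 1 + (k : Int) = idx + (k : Int) + 1 := by ring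
              rw [e1]
              rfl

-- ===== VERDICT (by name: the statement is the Claim_ definition above) =====
theorem boundaries_spec : Claim_equal_boundaries := by
  intro data _
  unfold Spec_boundaries boundaries boundaries_alt
  rw [aLoop_foldl data [] none 0]
  rw [aLoop_none_eq_bFrom data.length data le_rfl 0]
  rw [boundaries_alt_eq_bFrom data.length data le_rfl 0]
  simp
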